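-- pv_equiv track=rewrite | github.com/ronaldvdmeer/Mailwarden | src/mailwarden/email_parser.py | _split_addresses
-- ===== SOURCE A (Python) =====
-- def _split_addresses(value: str) -> list[str]:
--     """Split a list of addresses, respecting quotes."""
--     addresses = []
--     current = ""
--     in_quotes = False
--     in_angle = False
--
--     for char in value:
--         if char == '"' and not in_angle:
--             in_quotes = not in_quotes
--         elif char == "<":
--             in_angle = True
--         elif char == ">":
--             in_angle = False
--         elif char == "," and not in_quotes and not in_angle:
--             if current.strip():
--                 addresses.append(current.strip())
--             current = ""
--             continue
--         current += char
--
--     if current.strip():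
--         addresses.append(current.strip())
--
--     return addresses
-- ===== SOURCE B (Python) =====
-- def _split_addresses(value: str) -> list[str]:
--     """Split a list of addresses, respecting quotes.
--
--     Two passes: first record the indices of the top-level commas,
--     then slice the string at those indices, strip each piece and
--     keep the non-empty ones.
--     """
--     in_quotes = False
--     in_angle = False
--     cuts = []
--     for i, char in enumerate(value):
--         if char == '"' and not in_angle:
--             in_quotes = not in_quotes
--         elif char == "<":
--             in_angle = True
--         elif char == ">":
--             in_angle = False
--         elif char == "," and not in_quotes and not in_angle:
--             cuts.append(i)
--     starts = [0] + [i + 1 for i in cuts]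
--     ends = cuts + [len(value)]
--     return [s for a, b in zip(starts, ends) if (s := value[a:b].strip())]
-- ===== Notes on version B (the rewrite author's own statement) =====
-- stated objective: alternative
-- what changed: B replaces A's accumulate-a-string pass by two passes: the same state machine only records the indices of top-level commas, then the result is produced by slicing the string at those indices, stripping and filtering the pieces.
import Mathlib
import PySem

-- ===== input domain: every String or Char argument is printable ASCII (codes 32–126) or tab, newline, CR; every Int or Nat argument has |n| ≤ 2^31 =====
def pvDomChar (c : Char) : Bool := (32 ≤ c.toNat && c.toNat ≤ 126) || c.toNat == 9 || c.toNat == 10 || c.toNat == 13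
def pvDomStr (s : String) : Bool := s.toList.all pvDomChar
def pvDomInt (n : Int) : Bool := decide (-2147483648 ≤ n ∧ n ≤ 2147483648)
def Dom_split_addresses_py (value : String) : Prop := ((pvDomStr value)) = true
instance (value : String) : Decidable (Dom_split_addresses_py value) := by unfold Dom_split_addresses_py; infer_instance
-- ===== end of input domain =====

-- B records the indices of the top-level commas and slices the string afterwards,
-- instead of accumulating the current piece character by character (alternative decomposition, same cost).

-- ===== PORT A =====
def splitA_step (st : List String × List Char × Bool × Bool) (c : Char) :
    List String × List Char × Bool × Bool :=
  let (addrs, cur, q, a) := st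
  if c = '"' ∧ a = false then (addrs, cur ++ [c], !q, a)
  else if c = '<' then (addrs, cur ++ [c], q, true)
  else if c = '>' then (addrs, cur ++ [c], q, false)
  else if c = ',' ∧ q = false ∧ a = false then
    (if PySem.Chars.strip cur ≠ [] then addrs ++ [String.ofList (PySem.Chars.strip cur)] else addrs,
     [], q, a)
  else (addrs, cur ++ [c], q, a)

-- the final 'if current.strip(): addresses.append(current.strip())' of A
def splitA_fin (st : List String × List Char × Bool × Bool) : List String :=
  if PySem.Chars.strip st.2.1 ≠ [] then st.1 ++ [String.ofList (PySem.Chars.strip st.2.1)] else st.1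

def split_addresses_py (value : String) : List String :=
  splitA_fin (value.toList.foldl splitA_step ([], [], false, false))

-- ===== PORT B =====
def splitB_step (st : Bool × Bool × List Int) (p : Int × Char) : Bool × Bool × List Int :=
  let (q, a, cuts) := st
  if p.2 = '"' ∧ a = false then (!q, a, cuts)
  else if p.2 = '<' then (q, true, cuts)
  else if p.2 = '>' then (q, false, cuts)
  else if p.2 = ',' ∧ q = false ∧ a = false then (q, a, cuts ++ [p.1])
  else (q, a, cuts)

-- B's second pass: slice at the recorded comma indices, strip, keep the non-empty pieces
def splitB_render (cs : List Char) (cuts : List Int) : List String :=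
  ((0 :: cuts.map (· + 1)).zip (cuts ++ [(cs.length : Int)])).filterMap (fun p =>
    let s := PySem.Chars.strip (PySem.Chars.slice cs (some p.1) (some p.2))
    if s = [] then none else some (String.ofList s))

def split_addresses_py_alt (value : String) : List String :=
  splitB_render value.toList
    ((PySem.List.enumerate value.toList 0).foldl splitB_step (false, false, [])).2.2

-- ===== PRECONDITION & SPEC =====
def Spec_split_addresses_py (value : String) (out : List String) : Prop := out = split_addresses_py_alt value
instance (value : String) (out : List String) : Decidable (Spec_split_addresses_py value out) := by unfold Spec_split_addresses_py; infer_instance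

-- ===== CLAIM (what is proved, stated in full; the proofs are below) =====
def Claim_equal_split_addresses_py : Prop := ∀ (value : String), Dom_split_addresses_py value → Spec_split_addresses_py value (split_addresses_py value)

-- ===== LEMMAS AND PROOFS =====

-- the common reference decomposition: raw segments of the suffix, by structural recursion
def consHead (c : Char) : List (List Char) → List (List Char)
  | [] => [[c]]
  | s :: r => (c :: s) :: r

def splitSpec (q a : Bool) : List Char → List (List Char)
  | [] => [[]]
  | c :: t =>
    if c = '"' ∧ a = false then consHead c (splitSpec (!q) a t)
    else if c = '<' then consHead c (splitSpec q true t)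
    else if c = '>' then consHead c (splitSpec q false t)
    else if c = ',' ∧ q = false ∧ a = false then [] :: splitSpec q a t
    else consHead c (splitSpec q a t)

def postproc (seg : List Char) : Option String :=
  if PySem.Chars.strip seg = [] then none else some (String.ofList (PySem.Chars.strip seg))

def consAll (cur : List Char) : List (List Char) → List (List Char)
  | [] => [cur]
  | s :: r => (cur ++ s) :: r

theorem consAll_consHead (cur : List Char) (c : Char) (l : List (List Char)) :
    consAll cur (consHead c l) = consAll (cur ++ [c]) l := by
  cases l <;> simp [consAll, consHead]

theorem consHead_ne_nil (c : Char) (l : List (List Char)) : consHead c l ≠ [] := by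
  cases l <;> simp [consHead]

theorem splitSpec_ne_nil (q a : Bool) (t : List Char) : splitSpec q a t ≠ [] := by
  cases t with
  | nil => simp [splitSpec]
  | cons c t =>
    simp only [splitSpec]
    split_ifs <;> simp [consHead_ne_nil]

theorem consAll_nil_spec (q a : Bool) (t : List Char) :
    consAll [] (splitSpec q a t) = splitSpec q a t := by
  have h := splitSpec_ne_nil q a t
  cases hs : splitSpec q a t with
  | nil => exact absurd hs h
  | cons s r => simp [consAll]

-- A's loop computes: pending addresses ++ rendered segments of the suffix (head segment prefixed by cur)
theorem foldA (t : List Char) : ∀ (addrs : List String) (cur : List Char) (q a : Bool),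
    splitA_fin (t.foldl splitA_step (addrs, cur, q, a))
      = addrs ++ (consAll cur (splitSpec q a t)).filterMap postproc := by
  induction t with
  | nil =>
    intro addrs cur q a
    simp only [List.foldl_nil, splitA_fin, splitSpec, consAll, List.append_nil,
      List.filterMap_cons, List.filterMap_nil, postproc]
    split_ifs <;> simp_all
  | cons c t ih =>
    intro addrs cur q a
    simp only [List.foldl_cons, splitA_step, splitSpec]
    split_ifs with h1 h2 h3 h4 h5
    · rw [ih, consAll_consHead]
    · rw [ih, consAll_consHead]
    · rw [ih, consAll_consHead]
    · rw [ih, consAll_nil_spec]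
      simp [consAll, postproc, h5]
    · rw [ih, consAll_nil_spec]
      have h5' : PySem.Chars.strip cur = [] := by
        by_contra hc; exact h5 hc
      simp [consAll, postproc, h5']
    · rw [ih, consAll_consHead]

-- recursive characterisation of B's first pass (indices of top-level commas)
def cutsRec (q a : Bool) (k : Nat) : List Char → List Nat
  | [] => []
  | c :: t =>
    if c = '"' ∧ a = false then cutsRec (!q) a (k + 1) t
    else if c = '<' then cutsRec q true (k + 1) t
    else if c = '>' then cutsRec q false (k + 1) t
    else if c = ',' ∧ q = false ∧ a = false then k :: cutsRec q a (k + 1) t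
    else cutsRec q a (k + 1) t

theorem foldB (t : List Char) : ∀ (k : Nat) (q a : Bool) (acc : List Int),
    ((PySem.List.enumerate t (k : Int)).foldl splitB_step (q, a, acc)).2.2
      = acc ++ (cutsRec q a k t).map (fun n : Nat => (n : Int)) := by
  induction t with
  | nil => intro k q a acc; simp [PySem.List.enumerate_nil, cutsRec]
  | cons c t ih =>
    intro k q a acc
    have hk : (k : Int) + 1 = ((k + 1 : Nat) : Int) := by push_cast; ring
    rw [PySem.List.enumerate_cons, hk]
    simp only [List.foldl_cons, splitB_step, cutsRec]
    split_ifs <;> first | (rw [ih]; simp) | rw [ih]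

theorem cutsRec_ge (t : List Char) : ∀ (q a : Bool) (k : Nat), ∀ n ∈ cutsRec q a k t, k ≤ n := by
  induction t with
  | nil => intro q a k n hn; simp [cutsRec] at hn
  | cons c t ih =>
    intro q a k n hn
    simp only [cutsRec] at hn
    split_ifs at hn with h1 h2 h3 h4
    · exact Nat.le_of_succ_le (ih _ _ _ _ hn)
    · exact Nat.le_of_succ_le (ih _ _ _ _ hn)
    · exact Nat.le_of_succ_le (ih _ _ _ _ hn)
    · rcases List.mem_cons.mp hn with h | h
      · omega
      · exact Nat.le_of_succ_le (ih _ _ _ _ h)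
    · exact Nat.le_of_succ_le (ih _ _ _ _ hn)

def sliceN (cs : List Char) (p : Nat × Nat) : List Char := (cs.drop p.1).take (p.2 - p.1)

theorem drop_succ_of_drop_cons (cs : List Char) (c : Char) (t : List Char) (k : Nat)
    (h : cs.drop k = c :: t) : cs.drop (k + 1) = t := by
  have h1 : cs.drop (k + 1) = (cs.drop k).drop 1 := by rw [List.drop_drop]
  rw [h1, h]; rfl

theorem firstSlice (cs : List Char) (c : Char) (t : List Char) (k e0 : Nat)
    (h : cs.drop k = c :: t) (he : k + 1 ≤ e0) :
    sliceN cs (k, e0) = c :: sliceN cs (k + 1, e0) := by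
  have hd := drop_succ_of_drop_cons cs c t k h
  have h1 : e0 - k = (e0 - (k + 1)) + 1 := by omega
  simp [sliceN, h, hd, h1]

theorem shift_head (cs : List Char) (c : Char) (t : List Char) (k : Nat)
    (h : cs.drop k = c :: t) (r : List Nat) (hr : ∀ n ∈ r, k + 1 ≤ n) :
    ((k :: r.map (· + 1)).zip (r ++ [cs.length])).map (sliceN cs)
      = consHead c ((((k + 1) :: r.map (· + 1)).zip (r ++ [cs.length])).map (sliceN cs)) := by
  have hlen : k + 1 ≤ cs.length := by
    by_contra hc
    rw [List.drop_eq_nil_of_le (by omega)] at h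
    simp at h
  cases r with
  | nil =>
    simp only [List.map_nil, List.nil_append, List.zip_cons_cons, List.zip_nil_left,
      List.map_cons, List.map_nil, consHead]
    rw [firstSlice cs c t k cs.length h hlen]
  | cons d r' =>
    have hd : k + 1 ≤ d := hr d (List.mem_cons_self)
    simp only [List.map_cons, List.cons_append, List.zip_cons_cons, List.map_cons, consHead]
    rw [firstSlice cs c t k d h hd]

theorem segEq (cs : List Char) : ∀ (t : List Char) (k : Nat) (q a : Bool), cs.drop k = t →
    (((k :: (cutsRec q a k t).map (· + 1)).zip (cutsRec q a k t ++ [cs.length])).map (sliceN cs))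
      = splitSpec q a t := by
  intro t
  induction t with
  | nil =>
    intro k q a h
    simp [cutsRec, splitSpec, sliceN, h]
  | cons c t ih =>
    intro k q a h
    have hd := drop_succ_of_drop_cons cs c t k h
    simp only [cutsRec, splitSpec]
    split_ifs with h1 h2 h3 h4
    · rw [shift_head cs c t k h _ (cutsRec_ge t (!q) a (k + 1)), ih (k + 1) (!q) a hd]
    · rw [shift_head cs c t k h _ (cutsRec_ge t q true (k + 1)), ih (k + 1) q true hd]
    · rw [shift_head cs c t k h _ (cutsRec_ge t q false (k + 1)), ih (k + 1) q false hd]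
    · simp only [List.map_cons, List.cons_append, List.zip_cons_cons, List.map_cons]
      rw [ih (k + 1) q a hd]
      have hk : sliceN cs (k, k) = [] := by simp [sliceN]
      rw [hk]
    · rw [shift_head cs c t k h _ (cutsRec_ge t q a (k + 1)), ih (k + 1) q a hd]

theorem B_eq (value : String) :
    split_addresses_py_alt value = (splitSpec false false value.toList).filterMap postproc := by
  unfold split_addresses_py_alt
  have h0 : (0 : Int) = ((0 : Nat) : Int) := by norm_num
  rw [h0, foldB value.toList 0 false false []]
  rw [List.nil_append]
  unfold splitB_render
  have hstarts : (0 : Int) :: ((cutsRec false false 0 value.toList).map (fun n : Nat => (n : Int))).map (· + 1)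
      = (0 :: (cutsRec false false 0 value.toList).map (· + 1)).map (fun n : Nat => (n : Int)) := by
    rw [List.map_cons, List.map_map, List.map_map]
    refine congrArg₂ List.cons rfl (List.map_congr_left ?_)
    intro n _
    show (n : Int) + 1 = ((n + 1 : Nat) : Int)
    push_cast; ring
  have hends : (cutsRec false false 0 value.toList).map (fun n : Nat => (n : Int)) ++ [(value.toList.length : Int)]
      = (cutsRec false false 0 value.toList ++ [value.toList.length]).map (fun n : Nat => (n : Int)) := by
    rw [List.map_append]
    rfl
  rw [hstarts, hends, List.zip_map, List.filterMap_map]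
  have hcong : ∀ p ∈ (0 :: (cutsRec false false 0 value.toList).map (· + 1)).zip
      (cutsRec false false 0 value.toList ++ [value.toList.length]),
      ((fun p : Int × Int =>
          let s := PySem.Chars.strip (PySem.Chars.slice value.toList (some p.1) (some p.2))
          if s = [] then none else some (String.ofList s)) ∘
        Prod.map (fun n : Nat => (n : Int)) (fun n : Nat => (n : Int))) p
        = (fun p => postproc (sliceN value.toList p)) p := by
    intro p _
    simp [Prod.map, PySem.Chars.slice_eq_listSlice, PySem.List.slice_natCast, sliceN, postproc]
  rw [List.filterMap_congr hcong]
  have hback : ((0 :: (cutsRec false false 0 value.toList).map (· + 1)).zip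
      (cutsRec false false 0 value.toList ++ [value.toList.length])).filterMap
        (fun p => postproc (sliceN value.toList p))
      = (((0 :: (cutsRec false false 0 value.toList).map (· + 1)).zip
          (cutsRec false false 0 value.toList ++ [value.toList.length])).map
            (sliceN value.toList)).filterMap postproc := by
    rw [List.filterMap_map]; rfl
  rw [hback, segEq value.toList value.toList 0 false false (by simp)]

theorem A_eq (value : String) :
    split_addresses_py value = (splitSpec false false value.toList).filterMap postproc := by
  unfold split_addresses_py
  rw [foldA value.toList [] [] false false, consAll_nil_spec, List.nil_append]

-- ===== VERDICT (by name: the statement is the Claim_ definition above) =====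
theorem split_addresses_py_spec : Claim_equal_split_addresses_py := by
  intro value _
  unfold Spec_split_addresses_py
  rw [A_eq, B_eq]
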